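-- pv_equiv track=rewrite | github.com/UOR-Foundation/atlas-embeddings | atlas/aep/pirtm.py | infinite_prime_convergence_ok
-- ===== SOURCE A (Python) =====
-- from typing import Callable, List, Dict, Optional
--
-- def infinite_prime_convergence_ok(sig_history: List[Dict[int, int]], window: int = 4) -> bool:
--     """
--     Conservative check: over the last `window` snapshots, the max exponent
--     for each prime does not strictly increase at the final step.
--     """
--     if len(sig_history) < 2:
--         return True
--     H = sig_history[-min(window, len(sig_history)):]
--     # union of primes present
--     primes = set()
--     for s in H:
--         primes |= set(s.keys())
--     for p in primes:
--         seq = [s.get(p, 0) for s in H]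
--         if len(seq) >= 2 and seq[-1] > max(seq[:-1]):
--             return False
--     return True
-- ===== SOURCE B (Python) =====
-- # Candidate elimination: keep the primes that could still witness an increase and
-- # shrink that set snapshot by snapshot, stopping as soon as it is empty.
-- def infinite_prime_convergence_ok(sig_history, window=4):
--     if len(sig_history) < 2:
--         return True
--     H = sig_history[-min(window, len(sig_history)):]
--     if len(H) < 2:
--         return True
--     earlier, final = H[:-1], H[-1]
--     candidates = set()
--     for s in H:
--         candidates |= s.keys()
--     for s in earlier:
--         candidates = {p for p in candidates if s.get(p, 0) < final.get(p, 0)}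
--         if not candidates:
--             return True
--     return False
-- ===== Notes on version B (the rewrite author's own statement) =====
-- stated objective: faster
-- what changed: A loops over every prime in the window's key union and rescans all snapshots per prime; B transposes the traversal into candidate elimination: one set of surviving primes is shrunk snapshot by snapshot against the final snapshot, returning True as soon as it empties.
import Mathlib
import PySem

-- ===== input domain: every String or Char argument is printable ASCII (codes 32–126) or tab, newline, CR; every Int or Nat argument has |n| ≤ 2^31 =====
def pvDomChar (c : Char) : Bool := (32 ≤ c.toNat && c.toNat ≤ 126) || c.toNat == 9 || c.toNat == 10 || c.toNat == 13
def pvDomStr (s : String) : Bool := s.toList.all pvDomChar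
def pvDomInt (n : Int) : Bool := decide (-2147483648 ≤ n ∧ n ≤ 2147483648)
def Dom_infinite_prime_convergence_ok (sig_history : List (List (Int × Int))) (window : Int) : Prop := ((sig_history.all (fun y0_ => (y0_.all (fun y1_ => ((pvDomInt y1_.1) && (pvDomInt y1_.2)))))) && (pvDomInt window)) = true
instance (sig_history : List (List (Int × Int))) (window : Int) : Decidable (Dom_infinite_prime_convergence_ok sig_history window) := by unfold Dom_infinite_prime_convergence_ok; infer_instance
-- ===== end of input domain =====

-- B replaces A's per-prime rescan of all window snapshots by candidate elimination:
-- the set of primes that could still witness an increase is shrunk snapshot by snapshot.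

-- shared primitive: s.get(p, 0) on a dict-as-association-list (first match)
def pvSnapGet (s : List (Int × Int)) (p : Int) : Int :=
  PySem.Dict.getD (PySem.Dict.mk s) p 0

-- ===== PORT A =====
def infinite_prime_convergence_ok (sig_history : List (List (Int × Int))) (window : Int) : Bool :=
  if sig_history.length < 2 then true
  else
    let H := PySem.List.slice sig_history (some (-(min window (sig_history.length : Int)))) none
    -- primes = set(); for s in H: primes |= set(s.keys())
    let primes : PySem.Set Int :=
      H.foldl (fun pr s => PySem.Set.union pr (PySem.Dict.keys (PySem.Dict.mk s))) PySem.Set.empty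
    -- for p in primes: if len(seq) >= 2 and seq[-1] > max(seq[:-1]): return False
    !(primes.any (fun p =>
        let seq := H.map (fun s => pvSnapGet s p)
        decide (2 ≤ seq.length) &&
          (match PySem.List.max? (PySem.List.slice seq none (some (-1))) (fun x => x) with
           | some m => decide (m < PySem.List.pyGetD seq (-1) 0)
           | none => false)))

-- ===== PORT B =====
-- 'for s in earlier: candidates = {p for p in candidates if s.get(p,0) < final.get(p,0)};
--  if not candidates: return True' … 'return False' after the loop
def pvElim (final : List (Int × Int)) : List (List (Int × Int)) → PySem.Set Int → Bool
  | [], _ => false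
  | s :: rest, cand =>
      let cand' := cand.filter (fun p => decide (pvSnapGet s p < pvSnapGet final p))
      if cand'.isEmpty then true else pvElim final rest cand'

def infinite_prime_convergence_ok_alt (sig_history : List (List (Int × Int))) (window : Int) : Bool :=
  if sig_history.length < 2 then true
  else
    let H := PySem.List.slice sig_history (some (-(min window (sig_history.length : Int)))) none
    if H.length < 2 then true
    else
      let earlier := PySem.List.slice H none (some (-1))
      let final := PySem.List.pyGetD H (-1) []
      let candidates : PySem.Set Int :=
        H.foldl (fun c s => PySem.Set.union c (PySem.Dict.keys (PySem.Dict.mk s))) PySem.Set.empty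
      pvElim final earlier candidates

-- ===== PRECONDITION & SPEC =====
def Spec_infinite_prime_convergence_ok (sig_history : List (List (Int × Int))) (window : Int) (out : Bool) : Prop := out = infinite_prime_convergence_ok_alt sig_history window
instance (sig_history : List (List (Int × Int))) (window : Int) (out : Bool) : Decidable (Spec_infinite_prime_convergence_ok sig_history window out) := by unfold Spec_infinite_prime_convergence_ok; infer_instance

-- ===== CLAIM =====
def Claim_equal_infinite_prime_convergence_ok : Prop := ∀ (sig_history : List (List (Int × Int))) (window : Int), Dom_infinite_prime_convergence_ok sig_history window → Spec_infinite_prime_convergence_ok sig_history window (infinite_prime_convergence_ok sig_history window)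

-- ===== LEMMAS AND PROOFS =====

-- max of a nonempty list, default 0 on []
def pvMaxD : List Int → Int
  | [] => 0
  | x :: t => t.foldl max x

theorem pvMax?_id_eq (l : List Int) (h : l ≠ []) :
    PySem.List.max? l (fun x => x) = some (pvMaxD l) := by
  cases l with
  | nil => simp at h
  | cons y t => rw [PySem.List.max?_id_cons]; rfl

theorem pvFoldlMax_lt (t : List Int) (x v : Int) :
    (t.foldl max x < v) ↔ (x < v ∧ ∀ y ∈ t, y < v) := by
  induction t generalizing x with
  | nil => simp
  | cons y t ih =>
      rw [List.foldl_cons, ih]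
      constructor
      · rintro ⟨h1, h2⟩
        exact ⟨lt_of_le_of_lt (le_max_left _ _) h1,
          fun z hz => by rcases List.mem_cons.mp hz with rfl | hz
                         · exact lt_of_le_of_lt (le_max_right _ _) h1
                         · exact h2 z hz⟩
      · rintro ⟨h1, h2⟩
        exact ⟨max_lt h1 (h2 y (List.mem_cons_self ..)),
          fun z hz => h2 z (List.mem_cons_of_mem _ hz)⟩

theorem pvMaxD_lt_iff (l : List Int) (h : l ≠ []) (v : Int) :
    (pvMaxD l < v) ↔ ∀ x ∈ l, x < v := by
  cases l with
  | nil => simp at h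
  | cons x t =>
      rw [pvMaxD, pvFoldlMax_lt]
      constructor
      · rintro ⟨h1, h2⟩ z hz
        rcases List.mem_cons.mp hz with rfl | hz
        · exact h1
        · exact h2 z hz
      · intro hall
        exact ⟨hall x (List.mem_cons_self ..), fun z hz => hall z (List.mem_cons_of_mem _ hz)⟩

theorem pvElim_eq (final : List (Int × Int)) (E : List (List (Int × Int)))
    (cand : PySem.Set Int) (hc : cand ≠ []) :
    pvElim final E cand
      = !decide (∃ p ∈ cand, ∀ s ∈ E, pvSnapGet s p < pvSnapGet final p) := by
  induction E generalizing cand with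
  | nil =>
      have hex : ∃ p ∈ cand, ∀ s ∈ ([] : List (List (Int × Int))), pvSnapGet s p < pvSnapGet final p := by
        rcases cand with _ | ⟨q, t⟩
        · simp at hc
        · exact ⟨q, List.mem_cons_self .., by simp⟩
      simp only [pvElim, decide_eq_true hex, Bool.not_true]
  | cons s rest ih =>
      rw [pvElim]
      set cand' := cand.filter (fun p => decide (pvSnapGet s p < pvSnapGet final p)) with hcand'
      have hmem : ∀ p, p ∈ cand' ↔ p ∈ cand ∧ pvSnapGet s p < pvSnapGet final p := by
        intro p; rw [hcand', List.mem_filter, decide_eq_true_eq]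
      by_cases he : cand'.isEmpty
      · rw [if_pos he]
        have hnone : ∀ p, p ∉ cand' := by
          intro p hp; rw [List.isEmpty_iff] at he; rw [he] at hp; exact List.not_mem_nil hp
        have : ¬ ∃ p ∈ cand, ∀ t ∈ s :: rest, pvSnapGet t p < pvSnapGet final p := by
          rintro ⟨p, hp, hall⟩
          exact hnone p ((hmem p).mpr ⟨hp, hall s (List.mem_cons_self ..)⟩)
        rw [decide_eq_false this, Bool.not_false]
      · rw [if_neg he]
        have hne : cand' ≠ [] := fun h => he (by rw [h]; rfl)
        rw [ih cand' hne]
        congr 1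
        simp only [decide_eq_decide]
        constructor
        · rintro ⟨p, hp, hall⟩
          obtain ⟨hpc, hps⟩ := (hmem p).mp hp
          exact ⟨p, hpc, fun t ht => by
            rcases List.mem_cons.mp ht with rfl | ht
            · exact hps
            · exact hall t ht⟩
        · rintro ⟨p, hp, hall⟩
          exact ⟨p, (hmem p).mpr ⟨hp, hall s (List.mem_cons_self ..)⟩,
            fun t ht => hall t (List.mem_cons_of_mem _ ht)⟩

-- ===== VERDICT (by name: the statement is the Claim_ definition above) =====
theorem infinite_prime_convergence_ok_spec : Claim_equal_infinite_prime_convergence_ok := by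
  intro sig w _
  unfold Spec_infinite_prime_convergence_ok infinite_prime_convergence_ok
    infinite_prime_convergence_ok_alt
  by_cases h2 : sig.length < 2
  · rw [if_pos h2, if_pos h2]
  · rw [if_neg h2, if_neg h2]
    set H := PySem.List.slice sig (some (-(min w (sig.length : Int)))) none with hH
    by_cases hlen : H.length < 2
    · rw [if_pos hlen, Bool.not_eq_true']
      refine List.any_eq_false.mpr (fun p _ => ?_)
      have hx : ¬ (2 ≤ H.length) := by omega
      simp [List.length_map, hx]
    · rw [if_neg hlen]
      have hne : H ≠ [] := by intro h; rw [h] at hlen; simp at hlen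
      have hHd : H = H.dropLast ++ [H.getLast hne] := (List.dropLast_append_getLast hne).symm
      set f := H.getLast hne with hf
      set E := H.dropLast with hEd
      have hlenE : E.length + 1 = H.length := by
        rw [hEd, List.length_dropLast]; omega
      have hEne : E ≠ [] := by
        intro h; rw [h] at hlenE; simp at hlenE; omega
      have hsl : PySem.List.slice H none (some (-1)) = E := PySem.List.slice_to_neg_one H
      have hfg : PySem.List.pyGetD H (-1) [] = f := by
        rw [hHd]; exact PySem.List.pyGetD_neg_one_append_singleton _ _ _
      rw [hsl, hfg]
      -- A's per-prime test equals 'the final value strictly exceeds every earlier value'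
      have hA : ∀ p : Int,
          (decide (2 ≤ (H.map (fun s => pvSnapGet s p)).length) &&
            (match PySem.List.max? (PySem.List.slice (H.map (fun s => pvSnapGet s p)) none (some (-1))) (fun x => x) with
             | some m => decide (m < PySem.List.pyGetD (H.map (fun s => pvSnapGet s p)) (-1) 0)
             | none => false))
          = decide (∀ s ∈ E, pvSnapGet s p < pvSnapGet f p) := by
        intro p
        have hmap : H.map (fun s => pvSnapGet s p)
            = E.map (fun s => pvSnapGet s p) ++ [pvSnapGet f p] := by
          rw [hHd, List.map_append, List.map_cons, List.map_nil]
        have hmne : E.map (fun s => pvSnapGet s p) ≠ [] := by simpa using hEne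
        rw [hmap, PySem.List.slice_to_neg_one, List.dropLast_concat,
          pvMax?_id_eq _ hmne, PySem.List.pyGetD_neg_one_append_singleton]
        have hlp : 2 ≤ (E.map (fun s => pvSnapGet s p) ++ [pvSnapGet f p]).length := by
          have := List.length_pos_iff.mpr hEne
          simp only [List.length_append, List.length_map, List.length_cons, List.length_nil]
          omega
        rw [decide_eq_true hlp, Bool.true_and]
        simp only [decide_eq_decide]
        rw [pvMaxD_lt_iff _ hmne]
        constructor
        · intro h s hs; exact h _ (List.mem_map_of_mem hs)
        · rintro h x hx; obtain ⟨s, hs, rfl⟩ := List.mem_map.mp hx; exact h s hs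
      simp only [hA]
      set U : PySem.Set Int :=
        H.foldl (fun pr s => PySem.Set.union pr (PySem.Dict.keys (PySem.Dict.mk s))) PySem.Set.empty
        with hU
      -- B's elimination loop decides the same existential
      rcases hUc : U with _ | ⟨q, t⟩
      · -- no primes at all: A's any is over [], B filters the empty set at the first snapshot
        rcases hEc : E with _ | ⟨s0, E'⟩
        · exact absurd hEc hEne
        · simp [pvElim]
      · rw [pvElim_eq f E (q :: t) (by simp)]
        cases hx : (q :: t).any (fun p => decide (∀ s ∈ E, pvSnapGet s p < pvSnapGet f p))
        · have : ¬ ∃ p ∈ (q :: t), ∀ s ∈ E, pvSnapGet s p < pvSnapGet f p := by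
            rintro ⟨p, hp, hall⟩
            exact (List.any_eq_false.mp hx p hp) (decide_eq_true hall)
          rw [decide_eq_false this]
        · obtain ⟨p, hp, hd⟩ := List.any_eq_true.mp hx
          have : ∃ p ∈ (q :: t), ∀ s ∈ E, pvSnapGet s p < pvSnapGet f p :=
            ⟨p, hp, of_decide_eq_true hd⟩
          rw [decide_eq_true this]
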